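-- pv_equiv track=rewrite | github.com/Parthaoff/neural-deductive-reasoning-solver | src/dataset.py | logic_tokenizer
-- ===== SOURCE A (Python) =====
-- import string
--
-- VARIABLES = list(string.ascii_uppercase)
--
-- def logic_tokenizer(expression):
--     """
--     Properly tokenizes logical expressions.
--     Handles: A, ~A, A -> B
--     """
--     tokens = []
--     i = 0
--     expression = expression.strip()
--
--     while i < len(expression):
--         # Check for implication
--         if expression[i:i+2] == "->":
--             tokens.append("->")
--             i += 2
--         # Check for negation
--         elif expression[i] == "~":
--             tokens.append("~")
--             i += 1
--         # Check for variable (uppercase letter)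
--         elif expression[i].isupper() and expression[i] in VARIABLES:
--             tokens.append(expression[i])
--             i += 1
--         # Check for semicolon
--         elif expression[i] == ";":
--             tokens.append(";")
--             i += 1
--         # Skip spaces and unknown characters
--         elif expression[i] == " ":
--             i += 1
--         else:
--             # Skip unknown characters silently
--             i += 1
--
--     return tokens
-- ===== SOURCE B (Python) =====
-- import string
--
-- def logic_tokenizer(expression):
--     # One-pass pair scan: zip each char with its successor; emit "->" on the
--     # ('-','>') pair, emit kept single chars, drop everything else.  The '>'
--     # consumed by an implication is harmless to re-visit since '>' is never a
--     # token, so no index bookkeeping (and no strip) is needed.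
--     keep = set(string.ascii_uppercase + "~;")
--     nxt = expression[1:] + "\0"
--     return ["->" if c == "-" and n == ">" else c
--             for c, n in zip(expression, nxt)
--             if (c == "-" and n == ">") or c in keep]
-- ===== Notes on version B (the rewrite author's own statement) =====
-- stated objective: simpler
-- what changed: Replaces the manual index-walking while-loop (with 2-step skips for '->') by a single comprehension over each character zipped with its successor, filtering kept tokens; no strip and no index bookkeeping are needed since non-token characters (including the '>' of a consumed '->') emit nothing, and the comprehension avoids the interpreted per-character loop overhead.
import Mathlib
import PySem

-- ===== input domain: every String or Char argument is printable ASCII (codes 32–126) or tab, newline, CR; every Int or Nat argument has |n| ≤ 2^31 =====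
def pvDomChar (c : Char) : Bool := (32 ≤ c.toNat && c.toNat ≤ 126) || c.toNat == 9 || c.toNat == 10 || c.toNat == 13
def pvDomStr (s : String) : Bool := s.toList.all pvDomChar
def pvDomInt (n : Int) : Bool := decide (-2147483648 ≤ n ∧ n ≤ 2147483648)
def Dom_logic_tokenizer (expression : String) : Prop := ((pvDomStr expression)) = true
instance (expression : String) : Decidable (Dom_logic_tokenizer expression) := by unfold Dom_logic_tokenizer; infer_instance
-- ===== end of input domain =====

-- B replaces A's manual index-walking while-loop by a single pair-wise pass
-- (each char zipped with its successor) with a filter+map; objective: simpler.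

-- ===== PORT A =====
-- VARIABLES = list(string.ascii_uppercase)
def pvVARS : List Char := ['A','B','C','D','E','F','G','H','I','J','K','L','M','N','O','P','Q','R','S','T','U','V','W','X','Y','Z']

-- the while-loop of A: recursion on the remaining characters (i → the drop at i);
-- `expression[i:i+2] == "->"` is the '-' :: '>' :: _ pattern.
-- PySem.Chars.isupper is exact for Python's str.isupper on the ASCII domain.
def goA : List Char → List String
  | [] => []
  | '-' :: '>' :: rest => "->" :: goA rest
  | c :: rest =>
    if c = '~' then "~" :: goA rest
    else if PySem.Chars.isupper c ∧ c ∈ pvVARS then String.ofList [c] :: goA rest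
    else if c = ';' then ";" :: goA rest
    else goA rest  -- spaces and unknown characters are both skipped

def logic_tokenizer (expression : String) : List String :=
  goA (PySem.Str.strip expression).toList

-- ===== PORT B =====
-- keep = set(string.ascii_uppercase + "~;")
def pvKeep : PySem.Set Char := PySem.Set.ofList (pvVARS ++ ['~', ';'])

-- the list comprehension over zip(expression, expression[1:] + "\0");
-- expression[1:] is drop 1 (slice with nonnegative start, exact).
def logic_tokenizer_alt (expression : String) : List String :=
  let cs := expression.toList
  let nxt := cs.drop 1 ++ ['\x00']
  ((cs.zip nxt).filter (fun p => (p.1 = '-' ∧ p.2 = '>') ∨ p.1 ∈ pvKeep)).map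
    (fun p => if p.1 = '-' ∧ p.2 = '>' then "->" else String.ofList [p.1])

-- ===== PRECONDITION & SPEC =====
def Spec_logic_tokenizer (expression : String) (out : List String) : Prop := out = logic_tokenizer_alt expression
instance (expression : String) (out : List String) : Decidable (Spec_logic_tokenizer expression out) := by unfold Spec_logic_tokenizer; infer_instance

-- ===== CLAIM (what is proved, stated in full; the proofs are below) =====
def Claim_equal_logic_tokenizer : Prop := ∀ (expression : String), Dom_logic_tokenizer expression → Spec_logic_tokenizer expression (logic_tokenizer expression)

-- ===== LEMMAS AND PROOFS =====

-- B's core as a function of the char list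
def altCore (cs : List Char) : List String :=
  ((cs.zip (cs.drop 1 ++ ['\x00'])).filter (fun p => (p.1 = '-' ∧ p.2 = '>') ∨ p.1 ∈ pvKeep)).map
    (fun p => if p.1 = '-' ∧ p.2 = '>' then "->" else String.ofList [p.1])

theorem altCore_cons (c : Char) (l : List Char) :
    altCore (c :: l) =
      (if c = '-' ∧ l.headD '\x00' = '>' then ["->"]
       else if c ∈ pvKeep then [String.ofList [c]] else []) ++ altCore l := by
  cases l with
  | nil => simp [altCore]; split_ifs <;> simp_all
  | cons x xs => simp [altCore]; split_ifs <;> simp_all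

theorem vars_upper : ∀ c ∈ pvVARS, PySem.Chars.isupper c = true := by
  have h : pvVARS.all PySem.Chars.isupper = true := by decide
  simpa [List.all_eq_true] using h

theorem mem_keep_iff (c : Char) : c ∈ pvKeep ↔ c ∈ pvVARS ∨ c = '~' ∨ c = ';' := by
  simp [pvKeep, PySem.Set.mem_ofList]

theorem notin_vars_dash : ('-' : Char) ∉ pvVARS := by decide

theorem goA_eq_altCore (cs : List Char) : goA cs = altCore cs := by
  induction cs using goA.induct with
  | case1 => simp [goA, altCore]
  | case2 rest ih =>
      simp only [goA, altCore_cons, ih]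
      simp [mem_keep_iff]
      decide
  | case3 rest _ ih =>
      simp only [goA, altCore_cons, ih]
      simp [mem_keep_iff]
  | case4 c rest h1 h2 h3 ih =>
      have hcv : c ∈ pvVARS := h3.2
      have hcd : c ≠ '-' := fun hc => notin_vars_dash (hc ▸ hcv)
      simp only [goA]
      rw [if_neg h2, if_pos h3, altCore_cons, ih]
      simp [mem_keep_iff, hcv, hcd]
  | case5 rest h1 h2 h3 ih =>
      simp only [goA, if_true]
      rw [altCore_cons, ih]
      simp [mem_keep_iff]
  | case6 c rest h1 h2 h3 h4 ih =>
      have hnp : ¬ (c = '-' ∧ rest.head?.getD '\x00' = '>') := by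
        rintro ⟨hc, hh⟩
        cases rest with
        | nil => simp at hh
        | cons r rs =>
            simp at hh
            exact h1 rs hc (by rw [hh])
      have hck : c ∉ pvKeep := by
        rw [mem_keep_iff]
        rintro (hv | h | h)
        · exact h3 ⟨vars_upper c hv, hv⟩
        · exact h2 h
        · exact h4 h
      simp only [goA]
      rw [if_neg h2, if_neg h3, if_neg h4, altCore_cons, ih]
      simp [hck]
      intro hc hh
      exact hnp ⟨hc, hh⟩

theorem goA_cons (c : Char) (rest : List Char) :
    goA (c :: rest) =
      if c = '-' ∧ rest.head? = some '>' then "->" :: goA rest.tail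
      else if c = '~' then "~" :: goA rest
      else if PySem.Chars.isupper c = true ∧ c ∈ pvVARS then String.ofList [c] :: goA rest
      else if c = ';' then ";" :: goA rest
      else goA rest := by
  rw [goA.eq_def]
  split
  next heq => simp at heq
  next rest' heq =>
    injection heq with hc hr
    subst hc; subst hr
    simp
  next c' rest' hno heq =>
    injection heq with hc hr
    subst hc; subst hr
    have hng : ¬(c = '-' ∧ rest.head? = some '>') := by
      rintro ⟨hc, hh⟩
      cases rest with
      | nil => simp at hh
      | cons r rs => simp at hh; exact hno rs hc (by rw [hh])
    rw [if_neg hng]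

theorem upper_not_space (c : Char) (h : PySem.Chars.isupper c = true) :
    PySem.Chars.isspace c = false := by
  rw [PySem.Chars.isupper, Bool.and_eq_true, decide_eq_true_iff, decide_eq_true_iff] at h
  have h65 : 65 ≤ c.toNat := by
    have := h.1; rw [Char.le_def, UInt32.le_iff_toNat_le] at this; exact this
  have h90 : c.toNat ≤ 90 := by
    have := h.2; rw [Char.le_def, UInt32.le_iff_toNat_le] at this; exact this
  rw [PySem.Chars.isspace]
  simp only [Bool.or_eq_false_iff, Bool.and_eq_false_iff, decide_eq_false_iff_not]
  omega

theorem goA_ws_left (w : Char) (l : List Char) (hw : PySem.Chars.isspace w = true) :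
    goA (w :: l) = goA l := by
  have hwd : w ≠ '-' := fun h => by subst h; exact absurd hw (by decide)
  have hwt : w ≠ '~' := fun h => by subst h; exact absurd hw (by decide)
  have hws : w ≠ ';' := fun h => by subst h; exact absurd hw (by decide)
  have hwu : ¬(PySem.Chars.isupper w = true ∧ w ∈ pvVARS) := fun hp => by
    rw [upper_not_space w hp.1] at hw; exact Bool.false_ne_true hw
  have hng : ¬(w = '-' ∧ l.head? = some '>') := fun hp => hwd hp.1
  rw [goA_cons, if_neg hng, if_neg hwt, if_neg hwu, if_neg hws]

theorem goA_all_ws (ws : List Char) (hw : ∀ w ∈ ws, PySem.Chars.isspace w = true) :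
    goA ws = [] := by
  induction ws with
  | nil => rfl
  | cons w l ih =>
      rw [goA_ws_left w l (hw w (List.mem_cons_self))]
      exact ih (fun x hx => hw x (List.mem_cons_of_mem w hx))

theorem goA_ws_right (xs ws : List Char) (hw : ∀ w ∈ ws, PySem.Chars.isspace w = true) :
    goA (xs ++ ws) = goA xs := by
  induction xs using goA.induct with
  | case1 => simpa [goA] using goA_all_ws ws hw
  | case2 rest ih => simpa [goA] using ih
  | case3 rest _ ih => simp [goA]; exact ih
  | case4 c rest h1 h2 h3 ih =>
      have hcd : c ≠ '-' := fun hc => by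
        subst hc; exact absurd h3.2 (by decide)
      have hng1 : ¬(c = '-' ∧ (rest ++ ws).head? = some '>') := fun hp => hcd hp.1
      have hng2 : ¬(c = '-' ∧ rest.head? = some '>') := fun hp => hcd hp.1
      rw [List.cons_append, goA_cons, goA_cons,
        if_neg hng1, if_neg hng2, if_neg h2, if_neg h2, if_pos h3, if_pos h3, ih]
  | case5 rest h1 h2 h3 ih => simp [goA]; exact ih
  | case6 c rest h1 h2 h3 h4 ih =>
      have hng1 : ¬(c = '-' ∧ (rest ++ ws).head? = some '>') := by
        rintro ⟨hc, hh⟩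
        cases rest with
        | cons r rs => simp at hh; exact h1 rs hc (by rw [hh])
        | nil =>
            cases ws with
            | nil => simp at hh
            | cons x xs =>
                simp at hh
                have hx := hw x List.mem_cons_self
                rw [hh] at hx
                exact absurd hx (by decide)
      have hng2 : ¬(c = '-' ∧ rest.head? = some '>') := by
        rintro ⟨hc, hh⟩
        cases rest with
        | nil => simp at hh
        | cons r rs => simp at hh; exact h1 rs hc (by rw [hh])
      rw [List.cons_append, goA_cons, goA_cons, if_neg hng1, if_neg hng2,
        if_neg h2, if_neg h2, if_neg h3, if_neg h3, if_neg h4, if_neg h4, ih]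

theorem goA_lstrip (cs : List Char) : goA (PySem.Chars.lstrip cs) = goA cs := by
  induction cs with
  | nil => rfl
  | cons c l ih =>
      by_cases h : PySem.Chars.isspace c = true
      · rw [PySem.Chars.lstrip] at ih ⊢
        rw [List.dropWhile_cons_of_pos h, ih, goA_ws_left c l h]
      · rw [PySem.Chars.lstrip, List.dropWhile_cons_of_neg h]

theorem goA_rstrip (l : List Char) : goA (PySem.Chars.rstrip l) = goA l := by
  have hdecomp : l = PySem.Chars.rstrip l ++ (l.reverse.takeWhile PySem.Chars.isspace).reverse := by
    rw [PySem.Chars.rstrip]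
    conv_lhs => rw [← l.reverse_reverse,
      ← List.takeWhile_append_dropWhile (p := PySem.Chars.isspace) (l := l.reverse)]
    rw [List.reverse_append]
  conv_rhs => rw [hdecomp]
  rw [goA_ws_right]
  intro w hwmem
  rw [List.mem_reverse] at hwmem
  exact List.mem_takeWhile_imp hwmem

theorem goA_strip (cs : List Char) : goA (PySem.Chars.strip cs) = goA cs := by
  rw [PySem.Chars.strip, goA_rstrip, goA_lstrip]

-- ===== VERDICT (by name: the statement is the Claim_ definition above) =====
theorem logic_tokenizer_spec : Claim_equal_logic_tokenizer := by
  intro e _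
  unfold Spec_logic_tokenizer logic_tokenizer logic_tokenizer_alt
  rw [show (PySem.Str.strip e).toList = PySem.Chars.strip e.toList from PySem.Str.toList_strip e]
  rw [goA_strip, goA_eq_altCore]
  rfl
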